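-- pv_equiv track=rewrite | github.com/yogurt-shadow/Berkeley-cs61a | examprep/exam03.py | no_eleven
-- ===== SOURCE A (Python) =====
-- def no_eleven(n):
--     if n == 0:
--         return [[]]
--     elif n == 1:
--         return [[6], [1]]
--     else:
--         a, b = no_eleven(n - 1), no_eleven(n - 2)
--         return [ s + [6]  for s in a] + [ s + [6, 1]  for s in b]
-- ===== SOURCE B (Python) =====
-- def no_eleven(n):
--     # Linear bottom-up pair recursion: one chain of n subproblems, each built once
--     # from the pair (result(k), result(k+1)) instead of A's exponential tree recursion.
--     def last_two(k):
--         if k == 0: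
--             return ([[]], [[6], [1]])
--         before, last = last_two(k - 1)
--         nxt = [s + t for src, t in ((last, [6]), (before, [6, 1])) for s in src]
--         return (last, nxt)
--     return last_two(n)[0]
-- ===== Notes on version B (the rewrite author's own statement) =====
-- stated objective: alternative
-- what changed: Replaces the naive doubly-recursive tree recursion with a linear pair recursion that carries only the previous two result lists, building each subproblem once by a single comprehension over (source, suffix) pairs.
import Mathlib
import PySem

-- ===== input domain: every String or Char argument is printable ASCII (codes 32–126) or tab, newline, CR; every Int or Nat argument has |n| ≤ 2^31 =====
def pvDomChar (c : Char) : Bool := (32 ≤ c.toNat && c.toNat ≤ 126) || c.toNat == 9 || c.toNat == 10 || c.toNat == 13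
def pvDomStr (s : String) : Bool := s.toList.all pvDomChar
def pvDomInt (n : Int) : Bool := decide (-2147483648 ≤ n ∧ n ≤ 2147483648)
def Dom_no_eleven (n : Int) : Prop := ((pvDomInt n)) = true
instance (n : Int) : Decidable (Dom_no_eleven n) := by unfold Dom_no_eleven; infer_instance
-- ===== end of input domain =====

-- B replaces A's naive exponential tree recursion by a linear pair recursion carrying
-- only the previous two result lists (each subproblem built once); equal return value on all n ≥ 0 (Pre_).

-- ===== PORT A =====
-- A's recursion, step for step: the two base cases, else recurse on n-1 and n-2
-- and append [6] / [6,1].  A diverges (RecursionError) for n < 0, excluded by Pre_;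
-- the port recurses on n.toNat, identical to A's recursion for all n ≥ 0.
def noElevenRec : Nat → List (List Int)
  | 0 => [[]]
  | 1 => [[6], [1]]
  | (k + 2) =>
      (noElevenRec (k + 1)).map (fun s => s ++ [6]) ++
      (noElevenRec k).map (fun s => s ++ [6, 1])

def no_eleven (n : Int) : List (List Int) := noElevenRec n.toNat

-- ===== PORT B =====
-- nxt = [s + t for src, t in ((last, [6]), (before, [6, 1])) for s in src]
def nextRow (before last : List (List Int)) : List (List Int) :=
  ([(last, ([6] : List Int)), (before, [6, 1])]).flatMap (fun q => q.1.map (fun s => s ++ q.2))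

-- last_two(k) = (result(k), result(k+1)); B diverges (RecursionError) for n < 0 like A
-- (excluded by Pre_); the port recurses on n.toNat, identical to B for all n ≥ 0.
def lastTwo : Nat → List (List Int) × List (List Int)
  | 0 => ([[]], [[6], [1]])
  | (k + 1) =>
      let p := lastTwo k
      (p.2, nextRow p.1 p.2)

def no_eleven_alt (n : Int) : List (List Int) := (lastTwo n.toNat).1

-- ===== PRECONDITION & SPEC =====
-- A recurses on n-1 and n-2 with no negative base case: for n < 0 it never returns
-- (RecursionError), so Pre_ admits exactly the n on which A returns.
def Pre_no_eleven (n : Int) : Prop := 0 ≤ n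
instance (n : Int) : Decidable (Pre_no_eleven n) := by unfold Pre_no_eleven; infer_instance
def pvWitness_no_eleven : Int := (3)

def Spec_no_eleven (n : Int) (out : List (List Int)) : Prop := out = no_eleven_alt n
instance (n : Int) (out : List (List Int)) : Decidable (Spec_no_eleven n out) := by unfold Spec_no_eleven; infer_instance

-- ===== CLAIM (what is proved, stated in full; the proofs are below) =====
def Claim_equal_no_eleven : Prop := ∀ (n : Int), Dom_no_eleven n → Pre_no_eleven n → Spec_no_eleven n (no_eleven n)

-- ===== LEMMAS AND PROOFS =====

-- the pair carried by B's recursion is exactly (A's result at k, A's result at k+1)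
theorem lastTwo_eq (k : Nat) : lastTwo k = (noElevenRec k, noElevenRec (k + 1)) := by
  induction k with
  | zero => rfl
  | succ k ih =>
      rw [lastTwo, ih]
      simp [nextRow, noElevenRec, List.flatMap]

-- ===== VERDICT (by name: the statement is the Claim_ definition above) =====
theorem no_eleven_spec : Claim_equal_no_eleven := by
  intro n _ _
  unfold Spec_no_eleven no_eleven no_eleven_alt
  rw [lastTwo_eq]
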